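-- pv_equiv track=rewrite | github.com/rpeepz/Python-Chess | main.py | knight_moves
-- ===== SOURCE A (Python) =====
-- def knight_moves(idx):
-- 	all_moves = []
-- 	moves = []
-- 	i = [0, 16, 8]
-- 	for n, val in enumerate(i):
-- 		if n == 0:
-- 			continue
-- 		k = idx - val + n
-- 		all_moves.append(k)
-- 		k = idx - val - n
-- 		all_moves.append(k)
-- 		k = idx + val + n
-- 		all_moves.append(k)
-- 		k = idx + val - n
-- 		all_moves.append(k)
-- 	for m in all_moves:
-- 		if abs(idx % 8 - m % 8) <= 2:
-- 			if m < 64 and m >= 0: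
-- 				moves.append(m)
-- 	return moves
-- ===== SOURCE B (Python) =====
-- def knight_moves(idx):
-- 	row, col = divmod(idx, 8)
-- 	moves = []
-- 	for dr, dc in ((-2, 1), (-2, -1), (2, 1), (2, -1), (-1, 2), (-1, -2), (1, 2), (1, -2)):
-- 		nr = row + dr
-- 		nc = col + dc
-- 		if 0 <= nr < 8 and 0 <= nc < 8:
-- 			moves.append(nr * 8 + nc)
-- 	return moves
-- ===== Notes on version B (the rewrite author's own statement) =====
-- stated objective: simpler
-- what changed: Single pass over the 8 explicit (row,col) knight deltas with divmod-derived coordinates and plain 0..7 bounds checks, instead of A's build-all-candidates pass (via an enumerate trick over an offset list) followed by a second filtering pass with a modular column-distance test.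
import Mathlib
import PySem

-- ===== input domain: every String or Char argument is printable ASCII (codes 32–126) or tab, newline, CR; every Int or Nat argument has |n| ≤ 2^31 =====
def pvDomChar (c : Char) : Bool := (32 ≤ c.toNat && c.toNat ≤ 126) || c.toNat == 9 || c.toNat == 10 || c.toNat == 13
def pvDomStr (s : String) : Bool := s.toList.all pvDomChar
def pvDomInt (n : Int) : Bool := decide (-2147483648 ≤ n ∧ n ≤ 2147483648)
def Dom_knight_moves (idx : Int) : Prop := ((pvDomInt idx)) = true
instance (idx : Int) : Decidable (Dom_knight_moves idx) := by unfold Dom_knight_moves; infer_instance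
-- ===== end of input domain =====

-- B replaces A's two passes (candidate building via an enumerate trick, then a modular
-- column-distance filter) by one pass over the eight explicit (row,col) knight deltas with plain
-- bounds checks; same return value for every int idx (objective: simpler).

-- ===== PORT A =====
def knight_moves (idx : Int) : List Int :=
  let all_moves : List Int :=
    (PySem.List.enumerate ([0, 16, 8] : List Int)).foldl
      (fun acc p =>
        if p.1 = 0 then acc
        else
          ((acc ++ [idx - p.2 + p.1]) ++ [idx - p.2 - p.1]) ++ [idx + p.2 + p.1] ++ [idx + p.2 - p.1])
      []
  all_moves.foldl
    (fun moves m =>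
      if (PySem.Int.mod idx 8 - PySem.Int.mod m 8).natAbs ≤ 2 then
        if m < 64 ∧ m ≥ 0 then moves ++ [m] else moves
      else moves)
    []

-- ===== PORT B =====
def knight_moves_alt (idx : Int) : List Int :=
  let row := PySem.Int.floordiv idx 8
  let col := PySem.Int.mod idx 8
  (([(-2, 1), (-2, -1), (2, 1), (2, -1), (-1, 2), (-1, -2), (1, 2), (1, -2)] : List (Int × Int)).foldl
    (fun moves p =>
      let nr := row + p.1
      let nc := col + p.2
      if 0 ≤ nr ∧ nr < 8 ∧ 0 ≤ nc ∧ nc < 8 then moves ++ [nr * 8 + nc] else moves)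
    [])

-- ===== PRECONDITION & SPEC =====
def Spec_knight_moves (idx : Int) (out : List Int) : Prop := out = knight_moves_alt idx
instance (idx : Int) (out : List Int) : Decidable (Spec_knight_moves idx out) := by unfold Spec_knight_moves; infer_instance

-- ===== CLAIM (what is proved, stated in full; the proofs are below) =====
def Claim_equal_knight_moves : Prop := ∀ (idx : Int), Dom_knight_moves idx → Spec_knight_moves idx (knight_moves idx)

-- ===== LEMMAS AND PROOFS =====

-- One loop step of A (candidate m, nested condition) equals one loop step of B (delta, bounds
-- check), given the conditions are equivalent and the appended values equal.
theorem pv_step (m v : Int) (P Q C : Prop) [Decidable P] [Decidable Q] [Decidable C]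
    (h : (P ∧ Q) ↔ C) (hv : m = v) (acc : List Int) :
    (if P then (if Q then acc ++ [m] else acc) else acc) = (if C then acc ++ [v] else acc) := by
  subst hv
  split_ifs <;> tauto

-- ===== VERDICT (by name: the statement is the Claim_ definition above) =====
theorem knight_moves_spec : Claim_equal_knight_moves := by
  intro idx _
  unfold Spec_knight_moves knight_moves knight_moves_alt
  have hm : PySem.Int.mod idx 8 = idx % 8 := PySem.Int.mod_eq_emod_of_pos (by norm_num)
  have hd : PySem.Int.floordiv idx 8 = idx / 8 := PySem.Int.floordiv_eq_ediv_of_pos (by norm_num)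
  have hm' : ∀ m : Int, PySem.Int.mod m 8 = m % 8 := fun m =>
    PySem.Int.mod_eq_emod_of_pos (by norm_num)
  norm_num only [PySem.List.enumerate_cons, PySem.List.enumerate_nil, List.foldl_cons,
    List.foldl_nil, hm, hd, hm', if_true, if_false, List.nil_append, List.singleton_append,
    List.cons_append, List.append_nil]
  have e1 : ∀ acc : List Int,
      (if (idx % 8 - (idx - 16 + 1) % 8).natAbs ≤ 2 then
        if idx - 16 + 1 < 64 ∧ idx - 16 + 1 ≥ 0 then acc ++ [idx - 16 + 1] else acc else acc)
      = (if 0 ≤ idx / 8 + -2 ∧ idx / 8 + -2 < 8 ∧ 0 ≤ idx % 8 + 1 ∧ idx % 8 + 1 < 8 then acc ++ [(idx / 8 + -2) * 8 + (idx % 8 + 1)] else acc) :=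
    fun acc => pv_step _ _ _ _ _ (by omega) (by omega) acc
  have e2 : ∀ acc : List Int,
      (if (idx % 8 - (idx - 16 - 1) % 8).natAbs ≤ 2 then
        if idx - 16 - 1 < 64 ∧ idx - 16 - 1 ≥ 0 then acc ++ [idx - 16 - 1] else acc else acc)
      = (if 0 ≤ idx / 8 + -2 ∧ idx / 8 + -2 < 8 ∧ 0 ≤ idx % 8 + -1 ∧ idx % 8 + -1 < 8 then acc ++ [(idx / 8 + -2) * 8 + (idx % 8 + -1)] else acc) :=
    fun acc => pv_step _ _ _ _ _ (by omega) (by omega) acc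
  have e3 : ∀ acc : List Int,
      (if (idx % 8 - (idx + 16 + 1) % 8).natAbs ≤ 2 then
        if idx + 16 + 1 < 64 ∧ idx + 16 + 1 ≥ 0 then acc ++ [idx + 16 + 1] else acc else acc)
      = (if 0 ≤ idx / 8 + 2 ∧ idx / 8 + 2 < 8 ∧ 0 ≤ idx % 8 + 1 ∧ idx % 8 + 1 < 8 then acc ++ [(idx / 8 + 2) * 8 + (idx % 8 + 1)] else acc) :=
    fun acc => pv_step _ _ _ _ _ (by omega) (by omega) acc
  have e4 : ∀ acc : List Int,
      (if (idx % 8 - (idx + 16 - 1) % 8).natAbs ≤ 2 then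
        if idx + 16 - 1 < 64 ∧ idx + 16 - 1 ≥ 0 then acc ++ [idx + 16 - 1] else acc else acc)
      = (if 0 ≤ idx / 8 + 2 ∧ idx / 8 + 2 < 8 ∧ 0 ≤ idx % 8 + -1 ∧ idx % 8 + -1 < 8 then acc ++ [(idx / 8 + 2) * 8 + (idx % 8 + -1)] else acc) :=
    fun acc => pv_step _ _ _ _ _ (by omega) (by omega) acc
  have e5 : ∀ acc : List Int,
      (if (idx % 8 - (idx - 8 + 2) % 8).natAbs ≤ 2 then
        if idx - 8 + 2 < 64 ∧ idx - 8 + 2 ≥ 0 then acc ++ [idx - 8 + 2] else acc else acc)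
      = (if 0 ≤ idx / 8 + -1 ∧ idx / 8 + -1 < 8 ∧ 0 ≤ idx % 8 + 2 ∧ idx % 8 + 2 < 8 then acc ++ [(idx / 8 + -1) * 8 + (idx % 8 + 2)] else acc) :=
    fun acc => pv_step _ _ _ _ _ (by omega) (by omega) acc
  have e6 : ∀ acc : List Int,
      (if (idx % 8 - (idx - 8 - 2) % 8).natAbs ≤ 2 then
        if idx - 8 - 2 < 64 ∧ idx - 8 - 2 ≥ 0 then acc ++ [idx - 8 - 2] else acc else acc)
      = (if 0 ≤ idx / 8 + -1 ∧ idx / 8 + -1 < 8 ∧ 0 ≤ idx % 8 + -2 ∧ idx % 8 + -2 < 8 then acc ++ [(idx / 8 + -1) * 8 + (idx % 8 + -2)] else acc) :=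
    fun acc => pv_step _ _ _ _ _ (by omega) (by omega) acc
  have e7 : ∀ acc : List Int,
      (if (idx % 8 - (idx + 8 + 2) % 8).natAbs ≤ 2 then
        if idx + 8 + 2 < 64 ∧ idx + 8 + 2 ≥ 0 then acc ++ [idx + 8 + 2] else acc else acc)
      = (if 0 ≤ idx / 8 + 1 ∧ idx / 8 + 1 < 8 ∧ 0 ≤ idx % 8 + 2 ∧ idx % 8 + 2 < 8 then acc ++ [(idx / 8 + 1) * 8 + (idx % 8 + 2)] else acc) :=
    fun acc => pv_step _ _ _ _ _ (by omega) (by omega) acc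
  have e8 : ∀ acc : List Int,
      (if (idx % 8 - (idx + 8 - 2) % 8).natAbs ≤ 2 then
        if idx + 8 - 2 < 64 ∧ idx + 8 - 2 ≥ 0 then acc ++ [idx + 8 - 2] else acc else acc)
      = (if 0 ≤ idx / 8 + 1 ∧ idx / 8 + 1 < 8 ∧ 0 ≤ idx % 8 + -2 ∧ idx % 8 + -2 < 8 then acc ++ [(idx / 8 + 1) * 8 + (idx % 8 + -2)] else acc) :=
    fun acc => pv_step _ _ _ _ _ (by omega) (by omega) acc
  have e0 :
      (if (idx % 8 - (idx - 16 + 1) % 8).natAbs ≤ 2 then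
        if idx - 16 + 1 < 64 ∧ idx - 16 + 1 ≥ 0 then [idx - 16 + 1] else ([] : List Int) else [])
      = (if 0 ≤ idx / 8 + -2 ∧ idx / 8 + -2 < 8 ∧ 0 ≤ idx % 8 + 1 ∧ idx % 8 + 1 < 8 then [(idx / 8 + -2) * 8 + (idx % 8 + 1)] else []) := by
    have := e1 []
    simpa using this
  rw [e0]
  simp only [e2, e3, e4, e5, e6, e7, e8]
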